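-- pv_equiv track=rewrite | github.com/Joelthomask/CrimeScan-AI | gui/frontend/quality_checker_page.py | build_decision_map
-- ===== SOURCE A (Python) =====
-- def build_decision_map(qc_report: dict, intelligence: dict):
--
--     decision_map = {
--         "blur": "Skipped",
--         "brightness": "Skipped",
--         "contrast": "Skipped",
--         "noise": "Skipped",
--         "resolution": "Skipped"
--     }
--
--     if not intelligence:
--         return decision_map
--
--     decision = intelligence.get("decision", {})
--     actions = decision.get("recommended_actions", [])
--
--     for act in actions:
--
--         t = act.get("type", "").lower()
--
--         if t == "deblur":
--             decision_map["blur"] = "Needs enhancement"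
--
--         elif t == "denoise":
--             decision_map["noise"] = "Needs enhancement"
--
--         elif t == "contrast":
--             decision_map["contrast"] = "Needs enhancement"
--
--         elif t in ["illumination_correction", "brightness", "relight"]:
--             decision_map["brightness"] = "Needs enhancement"
--
--         elif t in ["super_resolution", "face_restore", "gfpgan"]:
--             decision_map["resolution"] = "Needs enhancement"
--
--     return decision_map
-- ===== SOURCE B (Python) =====
-- _SYNONYMS = {
--     "blur": {"deblur"},
--     "brightness": {"illumination_correction", "brightness", "relight"},
--     "contrast": {"contrast"},
--     "noise": {"denoise"},
--     "resolution": {"super_resolution", "face_restore", "gfpgan"},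
-- }
--
--
-- def build_decision_map(qc_report: dict, intelligence: dict):
--     # Inverted decomposition: last-write-wins with a constant value means a
--     # category needs enhancement iff ANY action's type names it, so we do one
--     # existence scan per category instead of dispatching per action.
--     if not intelligence:
--         return {k: "Skipped" for k in _SYNONYMS}
--     actions = intelligence.get("decision", {}).get("recommended_actions", [])
--     types = [act.get("type", "").lower() for act in actions]
--     return {k: "Needs enhancement" if any(t in syn for t in types) else "Skipped"
--             for k, syn in _SYNONYMS.items()}
-- ===== Notes on version B (the rewrite author's own statement) =====
-- stated objective: simpler
-- what changed: Inverts the loop structure: instead of A's single pass over actions with a per-action if/elif dispatch mutating a 5-key dict, B precomputes the lowered types once and builds the result by one existence scan per category over its synonym set (correct because last-write-wins with a constant value reduces to 'was it ever named').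
import Mathlib
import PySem

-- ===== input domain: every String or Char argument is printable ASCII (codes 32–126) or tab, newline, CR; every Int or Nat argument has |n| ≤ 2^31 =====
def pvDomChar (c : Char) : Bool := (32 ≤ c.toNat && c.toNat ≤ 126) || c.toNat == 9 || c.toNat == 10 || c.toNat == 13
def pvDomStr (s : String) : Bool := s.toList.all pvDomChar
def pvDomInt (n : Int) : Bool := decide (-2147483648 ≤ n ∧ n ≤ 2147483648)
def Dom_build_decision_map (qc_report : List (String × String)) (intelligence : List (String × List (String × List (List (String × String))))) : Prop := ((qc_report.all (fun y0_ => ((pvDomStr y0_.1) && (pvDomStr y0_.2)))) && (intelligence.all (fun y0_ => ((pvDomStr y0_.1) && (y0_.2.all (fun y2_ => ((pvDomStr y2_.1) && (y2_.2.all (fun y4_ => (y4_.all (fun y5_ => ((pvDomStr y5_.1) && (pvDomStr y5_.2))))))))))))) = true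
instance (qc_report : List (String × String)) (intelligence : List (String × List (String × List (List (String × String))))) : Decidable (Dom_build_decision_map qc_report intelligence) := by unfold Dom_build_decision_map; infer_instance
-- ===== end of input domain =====

-- B inverts A's loop: instead of one pass over actions dispatching per action into a
-- mutated 5-key dict, B lowers the types once and does one existence scan per category
-- over its synonym set (objective: simpler).

-- ===== PORT A =====
-- one body of A's for-loop: the if/elif chain over the lowered action type
def pvStepA (d : PySem.Dict String String) (act : List (String × String)) : PySem.Dict String String :=
  let t := PySem.Str.lower ((PySem.Dict.mk act).getD "type" "")
  if t = "deblur" then d.insert "blur" "Needs enhancement"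
  else if t = "denoise" then d.insert "noise" "Needs enhancement"
  else if t = "contrast" then d.insert "contrast" "Needs enhancement"
  else if t ∈ ["illumination_correction", "brightness", "relight"] then d.insert "brightness" "Needs enhancement"
  else if t ∈ ["super_resolution", "face_restore", "gfpgan"] then d.insert "resolution" "Needs enhancement"
  else d

def build_decision_map (qc_report : List (String × String)) (intelligence : List (String × List (String × List (List (String × String))))) : List (String × String) :=
  let decision_map : PySem.Dict String String :=
    PySem.Dict.ofList [("blur", "Skipped"), ("brightness", "Skipped"), ("contrast", "Skipped"), ("noise", "Skipped"), ("resolution", "Skipped")]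
  if intelligence = [] then decision_map.items
  else
    let decision := (PySem.Dict.mk intelligence).getD "decision" []
    let actions := (PySem.Dict.mk decision).getD "recommended_actions" []
    (actions.foldl pvStepA decision_map).items

-- ===== PORT B =====
-- _SYNONYMS: category -> synonym set (small Python set, ported as its distinct-element list)
def pvSynonyms : List (String × List String) :=
  [("blur", ["deblur"]),
   ("brightness", ["illumination_correction", "brightness", "relight"]),
   ("contrast", ["contrast"]),
   ("noise", ["denoise"]),
   ("resolution", ["super_resolution", "face_restore", "gfpgan"])]

def build_decision_map_alt (qc_report : List (String × String)) (intelligence : List (String × List (String × List (List (String × String))))) : List (String × String) :=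
  if intelligence = [] then pvSynonyms.map (fun p => (p.1, "Skipped"))
  else
    let actions := (PySem.Dict.mk ((PySem.Dict.mk intelligence).getD "decision" [])).getD "recommended_actions" []
    let types := actions.map (fun act => PySem.Str.lower ((PySem.Dict.mk act).getD "type" ""))
    pvSynonyms.map (fun p => (p.1, if types.any (fun t => p.2.contains t) then "Needs enhancement" else "Skipped"))

-- ===== PRECONDITION & SPEC =====
def Spec_build_decision_map (qc_report : List (String × String)) (intelligence : List (String × List (String × List (List (String × String))))) (out : List (String × String)) : Prop := out = build_decision_map_alt qc_report intelligence
instance (qc_report : List (String × String)) (intelligence : List (String × List (String × List (List (String × String))))) (out : List (String × String)) : Decidable (Spec_build_decision_map qc_report intelligence out) := by unfold Spec_build_decision_map; infer_instance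

-- ===== CLAIM (what is proved, stated in full; the proofs are below) =====
def Claim_equal_build_decision_map : Prop := ∀ (qc_report : List (String × String)) (intelligence : List (String × List (String × List (List (String × String))))), Dom_build_decision_map qc_report intelligence → Spec_build_decision_map qc_report intelligence (build_decision_map qc_report intelligence)

-- ===== LEMMAS AND PROOFS =====

-- the five-slot dict shape A's loop preserves
def pvSt (b : Bool) : String := if b then "Needs enhancement" else "Skipped"
def pvMk (b br c n r : Bool) : PySem.Dict String String :=
  PySem.Dict.mk [("blur", pvSt b), ("brightness", pvSt br), ("contrast", pvSt c), ("noise", pvSt n), ("resolution", pvSt r)]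

def pvLT (act : List (String × String)) : String := PySem.Str.lower ((PySem.Dict.mk act).getD "type" "")

lemma pvStepA_mk (b br c n r : Bool) (act : List (String × String)) :
    pvStepA (pvMk b br c n r) act =
      pvMk (b || pvLT act = "deblur") (br || pvLT act ∈ (["illumination_correction", "brightness", "relight"] : List String))
        (c || pvLT act = "contrast") (n || pvLT act = "denoise")
        (r || pvLT act ∈ (["super_resolution", "face_restore", "gfpgan"] : List String)) := by
  unfold pvStepA
  rw [show PySem.Str.lower ((PySem.Dict.mk act).getD "type" "") = pvLT act from rfl]
  generalize pvLT act = t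
  have iblur : ∀ b br c n r, (pvMk b br c n r).insert "blur" "Needs enhancement" = pvMk true br c n r := fun b br c n r => by cases b <;> rfl
  have ibr : ∀ b br c n r, (pvMk b br c n r).insert "brightness" "Needs enhancement" = pvMk b true c n r := fun b br c n r => by cases br <;> rfl
  have ic : ∀ b br c n r, (pvMk b br c n r).insert "contrast" "Needs enhancement" = pvMk b br true n r := fun b br c n r => by cases c <;> rfl
  have inoise : ∀ b br c n r, (pvMk b br c n r).insert "noise" "Needs enhancement" = pvMk b br c true r := fun b br c n r => by cases n <;> rfl
  have ir : ∀ b br c n r, (pvMk b br c n r).insert "resolution" "Needs enhancement" = pvMk b br c n true := fun b br c n r => by cases r <;> rfl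
  dsimp only
  split_ifs with h1 h2 h3 h4 h5
  · subst h1; rw [iblur]; simp
  · subst h2; rw [inoise]; simp
  · subst h3; rw [ic]; simp
  · simp only [List.mem_cons, List.not_mem_nil, or_false] at h4
    rcases h4 with rfl | rfl | rfl <;> rw [ibr] <;> simp
  · simp only [List.mem_cons, List.not_mem_nil, or_false] at h5
    rcases h5 with rfl | rfl | rfl <;> rw [ir] <;> simp
  · simp [h1, h2, h3, h4, h5]

lemma pvFoldA (acts : List (List (String × String))) (b br c n r : Bool) :
    acts.foldl pvStepA (pvMk b br c n r) =
      pvMk (b || acts.any (fun a => pvLT a = "deblur"))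
        (br || acts.any (fun a => pvLT a ∈ (["illumination_correction", "brightness", "relight"] : List String)))
        (c || acts.any (fun a => pvLT a = "contrast"))
        (n || acts.any (fun a => pvLT a = "denoise"))
        (r || acts.any (fun a => pvLT a ∈ (["super_resolution", "face_restore", "gfpgan"] : List String))) := by
  induction acts generalizing b br c n r with
  | nil => simp
  | cons a as ih =>
    simp only [List.foldl_cons, List.any_cons, pvStepA_mk, ih, Bool.or_assoc]

-- B's per-category scan over the mapped types equals A's any over actions
lemma pvScanB (acts : List (List (String × String))) (syn : List String) :
    ((acts.map pvLT).any (fun t => syn.contains t)) = acts.any (fun a => decide (pvLT a ∈ syn)) := by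
  rw [List.any_map]
  congr 1
  funext a
  simp

-- ===== VERDICT (by name: the statement is the Claim_ definition above) =====
theorem build_decision_map_spec : Claim_equal_build_decision_map := by
  intro qc intel _
  unfold Spec_build_decision_map build_decision_map build_decision_map_alt
  by_cases hi : intel = []
  · simp only [hi, if_true]; rfl
  · simp only [hi, if_false]
    set acts := (PySem.Dict.mk ((PySem.Dict.mk intel).getD "decision" [])).getD "recommended_actions" [] with hacts
    have hdm0 : PySem.Dict.ofList [("blur", "Skipped"), ("brightness", "Skipped"), ("contrast", "Skipped"), ("noise", "Skipped"), ("resolution", "Skipped")] = pvMk false false false false false := rfl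
    have htypes : acts.map (fun act => PySem.Str.lower ((PySem.Dict.mk act).getD "type" "")) = acts.map pvLT := rfl
    rw [hdm0, pvFoldA, htypes]
    simp only [pvSynonyms, List.map_cons, List.map_nil, pvScanB, Bool.false_or]
    simp [pvMk, pvSt]
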